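-- pv_equiv track=rewrite | github.com/aquaosrs/advent-of-code | 2025/day2/part2/products.py | checkIfDuplicatingForLength
-- ===== SOURCE A (Python) =====
-- def checkIfDuplicatingForLength(productID, checkLength = 2):
--     idStr = str(productID)
--     lengthOfProductId = len(idStr)
--     if lengthOfProductId < checkLength * 2:
--         return False
--
--     allParts = [idStr[i:i+checkLength] for i in range(0, lengthOfProductId, checkLength)]
--
--     # if all parts are the same, return True
--     firstPart = allParts[0]
--     for part in allParts[1:]:
--         if part != firstPart:
--             return False
--
--     return True
-- ===== SOURCE B (Python) =====
-- def checkIfDuplicatingForLength(productID, checkLength = 2):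
--     idStr = str(productID)
--     n = len(idStr)
--     if n < checkLength * 2:
--         return False
--     firstPart = idStr[:checkLength]
--     k = -(-n // checkLength)  # ceiling division
--     return idStr == firstPart * k
-- ===== Notes on version B (the rewrite author's own statement) =====
-- stated objective: simpler
-- what changed: Replaces the chunk-list construction and the explicit part-by-part comparison loop with a single closed-form check: the string equals its first chunk tiled ceil(n/checkLength) times.
import Mathlib
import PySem

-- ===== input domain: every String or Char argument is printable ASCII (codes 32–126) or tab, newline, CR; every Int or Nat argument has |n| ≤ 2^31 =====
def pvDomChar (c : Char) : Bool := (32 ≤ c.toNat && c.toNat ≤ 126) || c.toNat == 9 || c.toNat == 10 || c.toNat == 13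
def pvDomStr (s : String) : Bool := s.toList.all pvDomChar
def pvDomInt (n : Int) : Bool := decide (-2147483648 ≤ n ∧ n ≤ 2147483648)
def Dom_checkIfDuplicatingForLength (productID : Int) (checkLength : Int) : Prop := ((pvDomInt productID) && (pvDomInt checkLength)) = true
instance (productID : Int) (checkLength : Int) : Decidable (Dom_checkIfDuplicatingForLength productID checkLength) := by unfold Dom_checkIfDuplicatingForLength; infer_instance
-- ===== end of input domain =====

-- B replaces A's chunk list + comparison loop by one closed-form tiling check (objective: simpler).

-- ===== PORT A =====
def checkIfDuplicatingForLength (productID : Int) (checkLength : Int) : Bool :=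
  let idStr := PySem.Int.toStr productID
  let lengthOfProductId := PySem.Str.len idStr
  if lengthOfProductId < checkLength * 2 then false
  else
    let allParts := (PySem.List.pyRange 0 lengthOfProductId checkLength).map
      (fun i => PySem.Str.slice idStr (some i) (some (i + checkLength)))
    -- allParts[0]: Python raises IndexError when allParts = [] (only reachable outside Pre_)
    match allParts with
    | [] => false
    | firstPart :: rest =>
      -- for part in allParts[1:]: if part != firstPart: return False / return True
      rest.all (fun part => part == firstPart)

-- ===== PORT B =====
-- firstPart * k : Python string repetition (empty for k ≤ 0); ported by hand, exact
def pvStrMul (s : String) (k : Int) : String :=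
  String.ofList ((List.replicate k.toNat s.toList).flatten)

def checkIfDuplicatingForLength_alt (productID : Int) (checkLength : Int) : Bool :=
  let idStr := PySem.Int.toStr productID
  let n := PySem.Str.len idStr
  if n < checkLength * 2 then false
  else
    let firstPart := PySem.Str.slice idStr none (some checkLength)
    let k := -(PySem.Int.floordiv (-n) checkLength)  -- ceiling division
    idStr == pvStrMul firstPart k

-- ===== PRECONDITION & SPEC =====
-- Pre_ excludes checkLength ≤ 0, on which the Python A raises (ValueError from range step 0,
-- IndexError from allParts[0] for negative checkLength) and never returns.
def Pre_checkIfDuplicatingForLength (productID : Int) (checkLength : Int) : Prop :=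
  1 ≤ checkLength
instance (productID : Int) (checkLength : Int) : Decidable (Pre_checkIfDuplicatingForLength productID checkLength) := by unfold Pre_checkIfDuplicatingForLength; infer_instance

def pvWitness_checkIfDuplicatingForLength : Int × Int := (1212, 2)

def Spec_checkIfDuplicatingForLength (productID : Int) (checkLength : Int) (out : Bool) : Prop := out = checkIfDuplicatingForLength_alt productID checkLength
instance (productID : Int) (checkLength : Int) (out : Bool) : Decidable (Spec_checkIfDuplicatingForLength productID checkLength out) := by unfold Spec_checkIfDuplicatingForLength; infer_instance

-- ===== CLAIM (what is proved, stated in full; the proofs are below) =====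
def Claim_equal_checkIfDuplicatingForLength : Prop := ∀ (productID : Int) (checkLength : Int), Dom_checkIfDuplicatingForLength productID checkLength → Pre_checkIfDuplicatingForLength productID checkLength → Spec_checkIfDuplicatingForLength productID checkLength (checkIfDuplicatingForLength productID checkLength)

-- ===== LEMMAS AND PROOFS =====

-- s equals f tiled m times iff s has length m*|f| and every |f|-chunk of s equals f
theorem pv_tile_iff (c : Nat) :
    ∀ (m : Nat) (f s : List Char), f.length = c →
      (s = (List.replicate m f).flatten ↔
        (s.length = m * c ∧ ∀ k < m, (s.drop (c * k)).take c = f)) := by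
  intro m
  induction m with
  | zero => intro f s hf; simp [List.length_eq_zero_iff, eq_comm]
  | succ m ih =>
    intro f s hf
    rw [List.replicate_succ, List.flatten_cons]
    have hsplit : s = f ++ (List.replicate m f).flatten ↔
        s.take c = f ∧ s.drop c = (List.replicate m f).flatten := by
      constructor
      · intro h
        rw [h, ← hf]
        exact ⟨List.take_left, List.drop_left⟩
      · rintro ⟨h1, h2⟩
        conv_lhs => rw [← List.take_append_drop c s]
        rw [h1, h2]
    rw [hsplit, ih f (s.drop c) hf]
    constructor
    · rintro ⟨h0, hlen, hk⟩
      have hcs : c ≤ s.length := by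
        have := congrArg List.length h0
        simp [hf] at this
        omega
      rw [List.length_drop] at hlen
      have hmc : (m + 1) * c = m * c + c := by ring
      refine ⟨by omega, ?_⟩
      rintro (_ | j) hk'
      · simpa using h0
      · have := hk j (by omega)
        rw [List.drop_drop] at this
        have e : c * (j + 1) = c + c * j := by ring
        rw [e]
        exact this
    · rintro ⟨hlen, hk⟩
      have hmc : (m + 1) * c = m * c + c := by ring
      refine ⟨by simpa using hk 0 (by omega), by rw [List.length_drop]; omega, ?_⟩
      intro k hk'
      have := hk (k + 1) (by omega)
      rw [List.drop_drop]
      have e : c + c * k = c * (k + 1) := by ring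
      rw [e]
      exact this


-- the two ports agree for every positive checkLength
theorem pv_main (p c : Int) (hpre : 1 ≤ c) :
    checkIfDuplicatingForLength p c = checkIfDuplicatingForLength_alt p c := by
  set idStr := PySem.Int.toStr p with hid
  set s : List Char := idStr.toList with hs
  set N : Nat := s.length with hN
  by_cases hlt : PySem.Str.len idStr < c * 2
  · simp only [checkIfDuplicatingForLength, checkIfDuplicatingForLength_alt]
    rw [if_pos hlt, if_pos hlt]
  · -- setup
    set cn : Nat := c.toNat with hcn
    have hc : (cn : Int) = c := Int.toNat_of_nonneg (by omega)
    have hcn1 : 1 ≤ cn := by omega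
    have hlen : PySem.Str.len idStr = (N : Int) := by
      simp [PySem.Str.len_eq, hs, hN]
    have hN2 : 2 * cn ≤ N := by
      rw [hlen, ← hc] at hlt
      omega
    obtain ⟨M, hMd⟩ : ∃ m, (N + cn - 1) / cn = m := ⟨_, rfl⟩
    have hdm := Nat.div_add_mod (N + cn - 1) cn
    have hmod := Nat.mod_lt (N + cn - 1) (show 0 < cn by omega)
    rw [hMd] at hdm
    obtain ⟨P, hPd⟩ : ∃ q, cn * M = q := ⟨_, rfl⟩
    rw [hPd] at hdm
    have hPle : N ≤ P ∧ P < N + cn := by omega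
    have hM2 : 2 ≤ M := by nlinarith [hPle.1, hPle.2]
    -- the chunk list index range
    have hrange : PySem.List.pyRange 0 (PySem.Str.len idStr) c
        = (List.range M).map (fun k : Nat => 0 + c * (k : Int)) := by
      rw [PySem.List.pyRange_of_pos 0 _ (show (0:Int) < c by omega)]
      rw [if_pos (show (0:Int) < PySem.Str.len idStr by rw [hlen]; omega)]
      rw [hlen, ← hc]
      rw [show ((N:Int) - 0 + (cn:Int) - 1) = ((N + cn - 1 : Nat) : Int) from by omega]
      rw [← Int.natCast_div, Int.toNat_natCast, hMd]
    -- the k-th chunk, on the list side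
    set g : Nat → String := fun k =>
      PySem.Str.slice idStr (some (0 + c * (k:Int))) (some (0 + c * (k:Int) + c)) with hg
    have hchunk : ∀ k : Nat, (g k).toList = (s.drop (cn * k)).take cn := by
      intro k
      rw [hg]
      simp only [PySem.Str.toList_slice, PySem.Chars.slice_eq_listSlice, ← hs]
      rw [← hc]
      rw [PySem.List.slice_toNat s (by positivity) (by positivity)]
      rw [show ((0:Int) + (cn:Int) * (k:Int)) = ((cn * k : Nat) : Int) from by push_cast; ring]
      rw [show (((cn * k : Nat) : Int) + (cn:Int)) = ((cn * k + cn : Nat) : Int) from by push_cast; ring]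
      rw [Int.toNat_natCast, Int.toNat_natCast, Nat.add_sub_cancel_left]
    have hgeq : ∀ a b : Nat,
        (g a = g b) ↔ ((s.drop (cn*a)).take cn = (s.drop (cn*b)).take cn) := by
      intro a b
      rw [← String.toList_inj, hchunk, hchunk]
    obtain ⟨M'', rfl⟩ : ∃ m, M = m + 1 := ⟨M - 1, by omega⟩
    -- A reduced to a Boolean all over the tail chunks
    have hA : checkIfDuplicatingForLength p c
        = ((List.range M'').map (fun j => g (j+1))).all (fun part => part == g 0) := by
      simp only [checkIfDuplicatingForLength]
      rw [if_neg hlt]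
      rw [hrange, List.range_succ_eq_map]
      simp only [List.map_cons, List.map_map]
      rfl
    -- B reduced to the tiling equation
    have hf : (PySem.Str.slice idStr none (some c)).toList = s.take cn := by
      simp only [PySem.Str.toList_slice, PySem.Chars.slice_eq_listSlice, ← hs]
      rw [PySem.List.slice_to s (by omega), ← hc, Int.toNat_natCast]
    have hkc : -(PySem.Int.floordiv (-(PySem.Str.len idStr)) c) = ((M'' + 1 : Nat) : Int) := by
      rw [PySem.Int.neg_floordiv_neg_eq_iff_of_pos (show (0:Int) < c by omega), hlen, ← hc]
      constructor
      · push_cast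
        nlinarith [hPle.2, hPd]
      · push_cast
        nlinarith [hPle.1, hPd]
    have hB : checkIfDuplicatingForLength_alt p c
        = decide (s = (List.replicate (M'' + 1) (s.take cn)).flatten) := by
      simp only [checkIfDuplicatingForLength_alt]
      rw [if_neg hlt, hkc, Bool.beq_eq_decide_eq]
      rw [decide_eq_decide]
      rw [← String.toList_inj]
      rw [show (pvStrMul (PySem.Str.slice idStr none (some c)) ((M'' + 1 : Nat) : Int)).toList
          = (List.replicate (M'' + 1) (s.take cn)).flatten from by
        simp only [pvStrMul, Int.toNat_natCast, String.toList_ofList, hf]]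
    rw [hA, hB]
    have hflen : (s.take cn).length = cn := by
      rw [List.length_take]; omega
    rw [show ((List.range M'').map (fun j => g (j+1))).all (fun part => part == g 0)
        = decide (∀ j < M'', g (j+1) = g 0) from ?_]
    · rw [decide_eq_decide,
        pv_tile_iff cn (M''+1) (s.take cn) s hflen]
      have hchunk0 : (s.drop (cn * 0)).take cn = s.take cn := by
        simp
      constructor
      · intro hall
        have hall' : ∀ k < M'' + 1, (s.drop (cn * k)).take cn = s.take cn := by
          rintro (_ | j) hk
          · exact hchunk0
          · rw [← hchunk0]
            exact (hgeq (j+1) 0).mp (hall j (by omega))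
        refine ⟨?_, hall'⟩
        -- the last chunk equals the first, so cn divides exactly: N = (M''+1) * cn
        have hlast := hall' M'' (by omega)
        have hlen' := congrArg List.length hlast
        rw [List.length_take, List.length_drop, List.length_take] at hlen'
        have hq : cn * M'' + cn = P := by rw [← hPd]; ring
        rw [show cn * M'' = P - cn from by omega] at hlen'
        rw [Nat.mul_comm, hPd]
        omega
      · rintro ⟨hlen', hall⟩
        intro j hj
        rw [hgeq (j+1) 0, hchunk0]
        exact hall (j+1) (by omega)
    · rw [Bool.eq_iff_iff, List.all_eq_true, decide_eq_true_iff]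
      constructor
      · intro h j hj
        have := h (g (j+1)) (List.mem_map.mpr ⟨j, List.mem_range.mpr hj, rfl⟩)
        exact beq_iff_eq.mp this
      · intro h x hx
        rw [List.mem_map] at hx
        obtain ⟨j, hj, rfl⟩ := hx
        rw [List.mem_range] at hj
        exact beq_iff_eq.mpr (h j hj)

-- ===== VERDICT (by name: the statement is the Claim_ definition above) =====
theorem checkIfDuplicatingForLength_spec : Claim_equal_checkIfDuplicatingForLength := by
  intro p c _ hpre
  unfold Spec_checkIfDuplicatingForLength
  exact pv_main p c hpre
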